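-- pv_equiv track=rewrite | github.com/arieldelplata/proyectos | parser/afds.py | afd_parentesisini
-- ===== SOURCE A (Python) =====
-- def afd_parentesisini (cadena):
--     estado_no_final=[0]
--     estado_final=[1]
--     estado_trampa='t'
--     estado=0
--     delta={
--         0: {chr(c): 1 if ('('== chr(c) ) else estado_trampa for c in range(128)},
--     }
--     for caracter in cadena:
--         if estado in delta and caracter in delta[estado]:
--             estado = delta[estado][caracter]
--         else:
--             estado = estado_trampa
--             break
--     if estado in estado_final:
--             #estado_final=estado_final
--         estado_final='aceptado'
--     elif estado == estado_trampa:
--             #estado_final=estado_trampa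
--         estado_final='trampa'
--     elif estado in estado_no_final:
--         #estado_final=estado_no_final
--         estado_final='no aceptado'
--     return estado_final
-- ===== SOURCE B (Python) =====
-- def afd_parentesisini(cadena):
--     items = list(cadena)
--     if len(items) == 0:
--         return 'no aceptado'
--     if len(items) == 1 and items[0] == '(':
--         return 'aceptado'
--     return 'trampa'
-- ===== Notes on version B (the rewrite author's own statement) =====
-- stated objective: simpler
-- what changed: Replaced the 128-entry transition table and the state-machine loop with a direct structural classification of the character sequence by its length and sole character.
import Mathlib
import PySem

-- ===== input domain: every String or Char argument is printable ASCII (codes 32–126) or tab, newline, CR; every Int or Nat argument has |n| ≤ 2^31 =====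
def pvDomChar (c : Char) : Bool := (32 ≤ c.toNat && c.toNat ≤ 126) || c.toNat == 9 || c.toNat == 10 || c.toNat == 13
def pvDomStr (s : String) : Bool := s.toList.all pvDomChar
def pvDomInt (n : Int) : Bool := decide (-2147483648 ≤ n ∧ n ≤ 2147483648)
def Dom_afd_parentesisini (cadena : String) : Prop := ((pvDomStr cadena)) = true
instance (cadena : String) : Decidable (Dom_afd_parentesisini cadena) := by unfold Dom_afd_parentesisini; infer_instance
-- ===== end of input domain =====

-- B replaces A's 128-entry transition table and state-machine loop by a direct
-- classification of the character list by its length and sole character; objective: simpler.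

-- ===== PORT A =====
-- state: Sum.inl k = the int state k, Sum.inr "t" = estado_trampa 't'
-- delta[0] = {chr(c): 1 if '(' == chr(c) else 't' for c in range(128)}
def afdDelta0 : PySem.Dict Char (Sum Int String) :=
  PySem.Dict.ofList ((PySem.List.pyRange 0 128 1).map (fun c =>
    ((Char.ofNat c.toNat), if '(' = Char.ofNat c.toNat then Sum.inl (1 : Int) else Sum.inr "t")))

-- the for-loop; the else-branch sets estado='t' and BREAKs (returns immediately);
-- a state that is not an int ('t') is never a key of delta, so it also breaks
def afdLoop (delta : PySem.Dict Int (PySem.Dict Char (Sum Int String))) :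
    List Char → Sum Int String → Sum Int String
  | [], estado => estado
  | caracter :: rest, estado =>
    match estado with
    | Sum.inl s =>
      if delta.contains s && (delta.getD s PySem.Dict.empty).contains caracter then
        afdLoop delta rest ((delta.getD s PySem.Dict.empty).getD caracter (Sum.inr "t"))
      else Sum.inr "t"
    | Sum.inr _ => Sum.inr "t"

def afd_parentesisini (cadena : String) : String :=
  let delta : PySem.Dict Int (PySem.Dict Char (Sum Int String)) := PySem.Dict.ofList [(0, afdDelta0)]
  let estado := afdLoop delta cadena.toList (Sum.inl 0)
  if estado = Sum.inl (1 : Int) then "aceptado"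
  else if estado = Sum.inr "t" then "trampa"
  else if estado = Sum.inl (0 : Int) then "no aceptado"
  else "no aceptado"  -- unreachable in Python (estado is always 0, 1 or 't')

-- ===== PORT B =====
def afd_parentesisini_alt (cadena : String) : String :=
  let items := cadena.toList
  if items.length = 0 then "no aceptado"
  else if items.length = 1 ∧ items[0]? = some '(' then "aceptado"
  else "trampa"

-- ===== PRECONDITION & SPEC =====
def Spec_afd_parentesisini (cadena : String) (out : String) : Prop := out = afd_parentesisini_alt cadena
instance (cadena : String) (out : String) : Decidable (Spec_afd_parentesisini cadena out) := by unfold Spec_afd_parentesisini; infer_instance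

-- ===== CLAIM (what is proved, stated in full; the proofs are below) =====
def Claim_equal_afd_parentesisini : Prop := ∀ (cadena : String), Dom_afd_parentesisini cadena → Spec_afd_parentesisini cadena (afd_parentesisini cadena)

-- ===== LEMMAS AND PROOFS =====

-- the transition table looked up at the n-th ASCII character
set_option maxRecDepth 4096 in
theorem afdDelta0_get (n : Nat) (h : n < 128) :
    afdDelta0.get? (Char.ofNat n) =
      some (if n = 40 then Sum.inl (1 : Int) else Sum.inr "t") := by
  revert h; revert n; decide

set_option maxRecDepth 8192 in
theorem afdDelta0_get' (c : Char) (h : c.toNat < 128) :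
    afdDelta0.get? c = some (if c = '(' then Sum.inl (1 : Int) else Sum.inr "t") := by
  have hx := afdDelta0_get c.toNat h
  rw [Char.ofNat_toNat] at hx
  rw [hx]
  congr 1
  by_cases hc : c = '('
  · subst hc; simp
  · have h40 : c.toNat ≠ 40 := by
      intro h40
      apply hc
      have := congrArg Char.ofNat h40
      rwa [Char.ofNat_toNat] at this
    simp [hc, h40]

theorem domChar_lt (c : Char) (h : pvDomChar c = true) : c.toNat < 128 := by
  simp [pvDomChar] at h; omega

theorem afd_parentesisini_spec : Claim_equal_afd_parentesisini := by
  intro cadena hdom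
  unfold Spec_afd_parentesisini afd_parentesisini afd_parentesisini_alt
  have hall : ∀ c ∈ cadena.toList, pvDomChar c = true := by
    simpa [Dom_afd_parentesisini, pvDomStr, List.all_eq_true] using hdom
  have hout : (PySem.Dict.ofList [((0:Int), afdDelta0)]).contains 0 = true := by
    simp [PySem.Dict.ofList, PySem.Dict.update]
  have houtg : (PySem.Dict.ofList [((0:Int), afdDelta0)]).getD 0 PySem.Dict.empty = afdDelta0 := by
    simp [PySem.Dict.ofList, PySem.Dict.update, PySem.Dict.getD_insert_self]
  cases hl : cadena.toList with
  | nil => simp [afdLoop]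
  | cons c rest =>
    have hc : c.toNat < 128 := domChar_lt c (hall c (by rw [hl]; exact List.mem_cons_self ..))
    have hget := afdDelta0_get' c hc
    have hcont : afdDelta0.contains c = true := by
      rw [PySem.Dict.contains_eq_isSome_get?, hget]; rfl
    have hgetD : afdDelta0.getD c (Sum.inr "t") = (if c = '(' then Sum.inl 1 else Sum.inr "t") := by
      rw [PySem.Dict.getD_eq_get?_getD, hget]; rfl
    have hstep : afdLoop (PySem.Dict.ofList [(0, afdDelta0)]) (c :: rest) (Sum.inl 0) =
        afdLoop (PySem.Dict.ofList [(0, afdDelta0)]) rest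
          (if c = '(' then Sum.inl 1 else Sum.inr "t") := by
      simp only [afdLoop]
      simp [hout, houtg, hcont, hgetD]
    by_cases hpar : c = '('
    · subst hpar
      cases rest with
      | nil => simp only [hstep]; simp [afdLoop]
      | cons d rest' =>
        have hc1 : (PySem.Dict.ofList [((0:Int), afdDelta0)]).contains 1 = false := by
          simp [PySem.Dict.ofList, PySem.Dict.update, PySem.Dict.contains_insert]
        simp only [hstep]
        simp [afdLoop, hc1]
    · cases rest with
      | nil => simp only [hstep]; simp [afdLoop, hpar]
      | cons d rest' => simp only [hstep]; simp [afdLoop, hpar]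

-- ===== VERDICT =====
-- (theorem afd_parentesisini_spec above proves Claim_equal_afd_parentesisini)
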